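-- pv_equiv track=rewrite | github.com/rheard/ProjectEuler | ProjectEuler/p051.py | generate_digit_permutations
-- ===== SOURCE A (Python) =====
-- def generate_digit_permutations(n, c):
--     yield n
--
--     for i, digit in enumerate(n):
--         if digit == c:
--             left_val = n[:i] + '*'
--             right_vals = generate_digit_permutations(n[i + 1:], c)
--             for right_val in right_vals:
--                 yield left_val + right_val
-- ===== SOURCE B (Python) =====
-- def generate_digit_permutations(n, c):
--     idxs = [i for i, d in enumerate(n) if d == c]
--     chars = list(n)
--
--     def rec(start, acc):
--         out = list(chars)
--         for p in acc:
--             out[p] = '*'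
--         yield ''.join(out)
--         for j in range(start, len(idxs)):
--             yield from rec(j + 1, acc + [idxs[j]])
--
--     yield from rec(0, [])
-- ===== Notes on version B (the rewrite author's own statement) =====
-- stated objective: alternative
-- what changed: Instead of recursing on string suffixes and rebuilding results by slicing/concatenation, B first collects the positions of c in one pass, then enumerates subsets of those positions by a start-index recursion with an accumulator and renders each output by stamping '*' into a copy of the character list.
import Mathlib
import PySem

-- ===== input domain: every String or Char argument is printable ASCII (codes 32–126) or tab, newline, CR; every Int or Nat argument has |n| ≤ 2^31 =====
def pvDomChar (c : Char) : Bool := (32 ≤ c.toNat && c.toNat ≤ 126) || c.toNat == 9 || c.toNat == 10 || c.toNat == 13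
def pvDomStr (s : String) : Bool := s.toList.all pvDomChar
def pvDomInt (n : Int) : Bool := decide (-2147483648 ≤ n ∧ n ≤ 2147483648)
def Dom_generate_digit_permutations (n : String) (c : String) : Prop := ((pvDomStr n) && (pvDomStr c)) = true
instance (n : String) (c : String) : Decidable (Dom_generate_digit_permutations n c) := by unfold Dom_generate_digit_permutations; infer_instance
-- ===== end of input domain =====

-- B replaces A's suffix-recursion with slicing/concatenation by an index pass collecting the
-- positions of c followed by a start-index subset recursion that stamps '*' into a char list;
-- objective: alternative decomposition (same output order, similar cost).
-- Both generators are ported as the List String of their yields, built over List Char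
-- (exact: Python strings are char sequences; String.ofList joins the chars).

-- ===== PORT A =====
-- yield n; for i, digit in enumerate(n): if digit == c:
--   left_val = n[:i] + '*'; for right_val in rec(n[i+1:], c): yield left_val + right_val
def pvGenA (c : String) (l : List Char) : List (List Char) :=
  l :: ((PySem.List.enumerate l 0).attach.flatMap (fun p =>
    if String.ofList [p.1.2] = c then
      (pvGenA c (PySem.List.slice l (some (p.1.1 + 1)) none)).map
        (fun r => (PySem.List.slice l none (some p.1.1) ++ ['*']) ++ r)
    else []))
termination_by l.length
decreasing_by
  obtain ⟨k, hk, hpd⟩ := (PySem.List.mem_enumerate_iff _ _ _).mp p.2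
  have hi : p.1.1 = (k : Int) := by
    have := congrArg Prod.fst hpd
    simpa using this
  simp only [hi]
  rw [show ((k : Int) + 1) = ((k + 1 : Nat) : Int) from by push_cast; ring,
    PySem.List.slice_from_natCast]
  simp only [List.length_drop]
  omega

def generate_digit_permutations (n : String) (c : String) : List String :=
  (pvGenA c n.toList).map (fun l => String.ofList l)

-- ===== PORT B =====
-- idxs = [i for i, d in enumerate(n) if d == c]   (indices from enumerate are ≥ 0, so .toNat is exact)
def pvIdxs (c : String) (chars : List Char) : List Nat :=
  ((PySem.List.enumerate chars 0).filter (fun p => decide (String.ofList [p.2] = c))).map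
    (fun p => p.1.toNat)

-- rec(start, acc): out = copy of chars with '*' at each p in acc; yield ''.join(out);
--                  for j in range(start, len(idxs)): yield from rec(j+1, acc + [idxs[j]])
def pvRecB (chars : List Char) (idxs : List Nat) (start : Nat) (acc : List Nat) :
    List (List Char) :=
  (acc.foldl (fun out p => out.set p '*') chars) ::
    ((List.range' start (idxs.length - start)).attach.flatMap (fun j =>
      pvRecB chars idxs (j.1 + 1) (acc ++ [idxs.getD j.1 0])))
termination_by idxs.length - start
decreasing_by
  have := List.mem_range'_1.mp j.2
  omega

def generate_digit_permutations_alt (n : String) (c : String) : List String :=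
  (pvRecB n.toList (pvIdxs c n.toList) 0 []).map (fun l => String.ofList l)

-- ===== PRECONDITION & SPEC =====
def Spec_generate_digit_permutations (n : String) (c : String) (out : List String) : Prop := out = generate_digit_permutations_alt n c
instance (n : String) (c : String) (out : List String) : Decidable (Spec_generate_digit_permutations n c out) := by unfold Spec_generate_digit_permutations; infer_instance

-- ===== CLAIM (what is proved, stated in full; the proofs are below) =====
def Claim_equal_generate_digit_permutations : Prop := ∀ (n : String) (c : String), Dom_generate_digit_permutations n c → Spec_generate_digit_permutations n c (generate_digit_permutations n c)

-- ===== LEMMAS AND PROOFS =====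

-- positions (absolute index; first char of l has index s) of the characters of l equal to c
def pvCpos (c : String) : List Char → Nat → List Nat
  | [], _ => []
  | d :: t, s => (if String.ofList [d] = c then [s] else []) ++ pvCpos c t (s + 1)

-- the char list rendered by B for a chosen position set acc
def pvRender (acc : List Nat) (a : List Char) : List Char :=
  acc.foldl (fun out p => out.set p '*') a

theorem pvAttachFlatMap {α β : Type} (l : List α) (f : α → List β) :
    l.attach.flatMap (fun x => f x.1) = l.flatMap f := by
  conv_rhs => rw [← List.attach_map_subtype_val l]
  rw [List.flatMap_map]

theorem pvFlatMapCongr {α β : Type} (l : List α) (f g : α → List β)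
    (h : ∀ a ∈ l, f a = g a) : l.flatMap f = l.flatMap g := by
  induction l with
  | nil => rfl
  | cons a t ih =>
    simp only [List.flatMap_cons]
    rw [h a (by simp), ih (fun x hx => h x (by simp [hx]))]

theorem pvCpos_bound (c : String) (l : List Char) (s : Nat) :
    ∀ p ∈ pvCpos c l s, s ≤ p ∧ p < s + l.length := by
  induction l generalizing s with
  | nil => simp [pvCpos]
  | cons d t ih =>
    intro p hp
    simp only [pvCpos, List.mem_append] at hp
    simp only [List.length_cons]
    rcases hp with hp | hp
    · have hps : p = s := by
        by_cases hg : String.ofList [d] = c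
        · simpa [hg] using hp
        · simp [hg] at hp
      omega
    · have := ih (s + 1) p hp
      omega

theorem pvCpos_pairwise (c : String) (l : List Char) (s : Nat) :
    (pvCpos c l s).Pairwise (· < ·) := by
  induction l generalizing s with
  | nil => simp [pvCpos]
  | cons d t ih =>
    simp only [pvCpos]
    refine List.pairwise_append.mpr ⟨?_, ih (s + 1), ?_⟩
    · split <;> simp
    · intro a ha b hb
      have hb' := (pvCpos_bound c t (s + 1) b hb).1
      have ha' : a = s := by
        by_cases hg : String.ofList [d] = c
        · simpa [hg] using ha
        · simp [hg] at ha
      omega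

theorem pvCpos_shift (c : String) (l : List Char) (s : Nat) :
    pvCpos c l s = (pvCpos c l 0).map (· + s) := by
  induction l generalizing s with
  | nil => simp [pvCpos]
  | cons d t ih =>
    simp only [pvCpos, List.map_append]
    congr 1
    · split <;> simp
    · rw [ih (s + 1), ih 1, List.map_map]
      apply List.map_congr_left
      intro x _
      simp only [Function.comp_apply]
      omega

theorem pvCpos_drop (c : String) (l : List Char) (k s : Nat) :
    pvCpos c (l.drop k) (s + k) = (pvCpos c l s).filter (fun p => decide (s + k ≤ p)) := by
  induction l generalizing k s with
  | nil => simp [pvCpos]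
  | cons d t ih =>
    cases k with
    | zero =>
      simp only [List.drop_zero, Nat.add_zero]
      exact (List.filter_eq_self.mpr (fun p hp => by
        simpa using (pvCpos_bound c (d :: t) s p hp).1)).symm
    | succ k =>
      simp only [List.drop_succ_cons, pvCpos, List.filter_append]
      have h1 : pvCpos c (t.drop k) (s + (k + 1)) = pvCpos c (t.drop k) ((s + 1) + k) := by
        congr 1
        omega
      rw [h1, ih k (s + 1)]
      have h2 : (List.filter (fun p => decide (s + 1 + k ≤ p)) (pvCpos c t (s + 1)))
          = (List.filter (fun p => decide (s + (k + 1) ≤ p)) (pvCpos c t (s + 1))) := by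
        apply List.filter_congr
        intro p _
        simp only [decide_eq_decide]
        omega
      rw [h2]
      have h3 : List.filter (fun p => decide (s + (k + 1) ≤ p))
          (if String.ofList [d] = c then [s] else []) = [] := by
        split <;> simp
      rw [h3, List.nil_append]

theorem pvSortedFilterDrop (S : List Nat) (j : Nat) (hs : S.Pairwise (· < ·))
    (hj : j < S.length) :
    S.filter (fun p => decide (S.getD j 0 + 1 ≤ p)) = S.drop (j + 1) := by
  induction S generalizing j with
  | nil => simp at hj
  | cons a t ih =>
    have hpw := List.pairwise_cons.mp hs
    cases j with
    | zero =>
      simp only [List.getD_cons_zero, List.drop_succ_cons, List.drop_zero, List.filter_cons]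
      rw [if_neg (by simp only [decide_eq_true_eq]; omega)]
      apply List.filter_eq_self.mpr
      intro p hp
      have := hpw.1 p hp
      simp only [decide_eq_true_eq]
      omega
    | succ j =>
      simp only [List.getD_cons_succ, List.drop_succ_cons, List.filter_cons]
      have hjt : j < t.length := by simpa using hj
      have hmem : t.getD j 0 ∈ t := by
        rw [List.getD_eq_getElem t 0 hjt]
        exact List.getElem_mem hjt
      rw [if_neg (by
        have := hpw.1 _ hmem
        simp only [decide_eq_true_eq]
        omega)]
      exact ih j hpw.2 hjt

theorem pvRangeMapGetD (S : List Nat) (s : Nat) :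
    (List.range' s (S.length - s)).map (fun j => S.getD j 0) = S.drop s := by
  by_cases h : s < S.length
  · have hn : S.length - s = (S.length - (s + 1)) + 1 := by omega
    rw [hn, List.range'_succ, List.map_cons, pvRangeMapGetD S (s + 1),
      List.getD_eq_getElem S 0 h]
    exact (List.drop_eq_getElem_cons h).symm
  · have hn : S.length - s = 0 := by omega
    rw [hn]
    simp [List.drop_eq_nil_of_le (by omega : S.length ≤ s)]
termination_by S.length - s
decreasing_by omega

theorem pvRenderLen (acc : List Nat) (a : List Char) :
    (pvRender acc a).length = a.length := by
  induction acc generalizing a with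
  | nil => rfl
  | cons p acc ih =>
    show (pvRender acc (a.set p '*')).length = a.length
    rw [ih, List.length_set]

theorem pvSetAppendLeft {α : Type} (a b : List α) (i : Nat) (h : i < a.length) (x : α) :
    (a ++ b).set i x = a.set i x ++ b := by
  induction a generalizing i with
  | nil => simp at h
  | cons y t ih =>
    cases i with
    | zero => simp
    | succ i =>
      simp only [List.cons_append, List.set_cons_succ]
      rw [ih i (by simp only [List.length_cons] at h; omega)]

theorem pvSetAppendRight {α : Type} (a b : List α) (i : Nat) (h : a.length ≤ i) (x : α) :
    (a ++ b).set i x = a ++ b.set (i - a.length) x := by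
  induction a generalizing i with
  | nil => simp
  | cons y t ih =>
    cases i with
    | zero => simp only [List.length_cons] at h; omega
    | succ i =>
      simp only [List.cons_append, List.set_cons_succ, List.length_cons]
      rw [ih i (by simp only [List.length_cons] at h; omega)]
      rw [show i + 1 - (t.length + 1) = i - t.length from by omega]

theorem pvRenderAppend (acc : List Nat) (a b : List Char) (h : ∀ p ∈ acc, p < a.length) :
    pvRender acc (a ++ b) = pvRender acc a ++ b := by
  induction acc generalizing a with
  | nil => rfl
  | cons p acc ih =>
    show pvRender acc ((a ++ b).set p '*') = pvRender acc (a.set p '*') ++ b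
    rw [pvSetAppendLeft a b p (h p (by simp)) '*']
    rw [ih (a.set p '*')]
    intro q hq
    rw [List.length_set]
    exact h q (by simp [hq])

theorem pvRenderSnoc (acc : List Nat) (p : Nat) (a : List Char) :
    pvRender (acc ++ [p]) a = (pvRender acc a).set p '*' := by
  simp [pvRender, List.foldl_append]

theorem pvSetTake (l : List Char) (k : Nat) (h : k < l.length) (x : Char) :
    (l.take (k + 1)).set k x = l.take k ++ [x] := by
  induction l generalizing k with
  | nil => simp at h
  | cons d t ih =>
    cases k with
    | zero => simp
    | succ k =>
      simp only [List.take_succ_cons, List.set_cons_succ, List.cons_append]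
      rw [ih k (by simp only [List.length_cons] at h; omega)]

theorem pvEnumFlat (c : String) (l : List Char) (s : Nat) (F : Int → List (List Char)) :
    (PySem.List.enumerate l (s : Int)).flatMap
        (fun p => if String.ofList [p.2] = c then F p.1 else [])
      = List.flatMap (fun (k : Nat) => F (k : Int)) (pvCpos c l s) := by
  induction l generalizing s with
  | nil => simp [PySem.List.enumerate_nil, pvCpos]
  | cons d t ih =>
    rw [PySem.List.enumerate_cons, List.flatMap_cons]
    simp only [pvCpos, List.flatMap_append]
    rw [show ((s : Int) + 1) = ((s + 1 : Nat) : Int) from by push_cast; ring, ih (s + 1)]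
    congr 1
    split <;> simp

theorem pvGenA_eq (c : String) (l : List Char) :
    pvGenA c l = l :: List.flatMap
      (fun (k : Nat) => (pvGenA c (l.drop (k + 1))).map (fun r => l.take k ++ '*' :: r))
      (pvCpos c l 0) := by
  rw [pvGenA.eq_def]
  congr 1
  rw [pvAttachFlatMap (PySem.List.enumerate l 0)
    (fun q => if String.ofList [q.2] = c then
      (pvGenA c (PySem.List.slice l (some (q.1 + 1)) none)).map
        (fun r => (PySem.List.slice l none (some q.1) ++ ['*']) ++ r)
    else [])]
  rw [show (0 : Int) = ((0 : Nat) : Int) from rfl]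
  rw [pvEnumFlat c l 0
    (fun i => (pvGenA c (PySem.List.slice l (some (i + 1)) none)).map
      (fun r => (PySem.List.slice l none (some i) ++ ['*']) ++ r))]
  apply pvFlatMapCongr
  intro k hk
  rw [show ((k : Int) + 1) = ((k + 1 : Nat) : Int) from by push_cast; ring,
    PySem.List.slice_from_natCast, PySem.List.slice_to_natCast]
  apply List.map_congr_left
  intro r _
  simp

theorem pvRecB_eq (chars : List Char) (idxs : List Nat) (start : Nat) (acc : List Nat) :
    pvRecB chars idxs start acc
      = pvRender acc chars ::
          (List.range' start (idxs.length - start)).flatMap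
            (fun j => pvRecB chars idxs (j + 1) (acc ++ [idxs.getD j 0])) := by
  unfold pvRender
  rw [pvRecB.eq_def]
  congr 1
  exact pvAttachFlatMap (List.range' start (idxs.length - start))
    (fun j => pvRecB chars idxs (j + 1) (acc ++ [idxs.getD j 0]))

theorem pvMain (c : String) (chars : List Char) (n start m : Nat) (acc : List Nat)
    (hn : n = (pvCpos c chars 0).length - start)
    (hstart : (pvCpos c chars 0).filter (fun p => decide (m ≤ p))
        = (pvCpos c chars 0).drop start)
    (hm : m ≤ chars.length)
    (hacc : ∀ p ∈ acc, p < m) :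
    pvRecB chars (pvCpos c chars 0) start acc
      = (pvGenA c (chars.drop m)).map (fun r => pvRender acc (chars.take m) ++ r) := by
  induction n using Nat.strong_induction_on generalizing start m acc with
  | _ n IH =>
  rw [pvRecB_eq, pvGenA_eq, List.map_cons]
  congr 1
  · -- heads
    have hh := pvRenderAppend acc (chars.take m) (chars.drop m)
      (by intro p hp; rw [List.length_take]; have := hacc p hp; omega)
    rw [List.take_append_drop] at hh
    exact hh
  · -- tails
    have hsub : pvCpos c (chars.drop m) 0
        = ((pvCpos c chars 0).drop start).map (fun p => p - m) := by
      have h1 : pvCpos c (chars.drop m) m = (pvCpos c chars 0).drop start := by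
        have hd := pvCpos_drop c chars m 0
        simp only [Nat.zero_add] at hd
        rw [hd, hstart]
      have h2 : pvCpos c (chars.drop m) m = (pvCpos c (chars.drop m) 0).map (· + m) :=
        pvCpos_shift c (chars.drop m) m
      have h3 : ((pvCpos c (chars.drop m) 0).map (· + m)).map (fun p => p - m)
          = pvCpos c (chars.drop m) 0 := by
        rw [List.map_map]
        conv_rhs => rw [← List.map_id (pvCpos c (chars.drop m) 0)]
        apply List.map_congr_left
        intro x _
        simp
      calc pvCpos c (chars.drop m) 0
          = ((pvCpos c (chars.drop m) 0).map (· + m)).map (fun p => p - m) := h3.symm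
        _ = (pvCpos c (chars.drop m) m).map (fun p => p - m) := by rw [← h2]
        _ = ((pvCpos c chars 0).drop start).map (fun p => p - m) := by rw [h1]
    rw [List.map_flatMap, hsub, ← pvRangeMapGetD (pvCpos c chars 0) start, List.map_map,
      List.flatMap_map]
    apply pvFlatMapCongr
    intro j hj
    have hjr := List.mem_range'_1.mp hj
    have hjlen : j < (pvCpos c chars 0).length := by omega
    simp only [Function.comp_apply]
    set idxs := pvCpos c chars 0 with hidxs
    set p := idxs.getD j 0 with hp
    have hpel : p = idxs[j]'hjlen := List.getD_eq_getElem idxs 0 hjlen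
    have hpmem : p ∈ idxs := hpel ▸ List.getElem_mem hjlen
    have hplen : p < chars.length := by
      have := pvCpos_bound c chars 0 p hpmem
      omega
    have hmp : m ≤ p := by
      have hlen2 : j - start < (idxs.drop start).length := by
        rw [List.length_drop]
        omega
      have h2 : (idxs.drop start)[j - start]'hlen2 = idxs[j]'hjlen := by
        have h' : start + (j - start) = j := by omega
        simp [List.getElem_drop, h']
      have hpdrop : p ∈ idxs.drop start := by
        rw [hpel, ← h2]
        exact List.getElem_mem _
      rw [← hstart] at hpdrop
      have := List.of_mem_filter hpdrop
      simpa using this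
    have hrec := IH (idxs.length - (j + 1)) (by omega) (j + 1) (p + 1) (acc ++ [p])
      rfl
      (by rw [hp]; exact pvSortedFilterDrop idxs j (pvCpos_pairwise c chars 0) hjlen)
      (by omega)
      (by intro q hq
          rcases List.mem_append.mp hq with hq | hq
          · have := hacc q hq
            omega
          · simp only [List.mem_singleton] at hq
            omega)
    rw [hrec]
    rw [show (chars.drop m).drop ((p - m) + 1) = chars.drop (p + 1) from by
      rw [List.drop_drop]; congr 1; omega]
    rw [List.map_map]
    apply List.map_congr_left
    intro r _
    simp only [Function.comp_apply]
    have hprefix : pvRender (acc ++ [p]) (chars.take (p + 1))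
        = pvRender acc (chars.take m) ++ ((chars.drop m).take (p - m) ++ ['*']) := by
      rw [pvRenderSnoc]
      rw [show chars.take (p + 1) = chars.take m ++ (chars.drop m).take (p + 1 - m) from by
        rw [show p + 1 = m + (p + 1 - m) from by omega, List.take_add,
          show m + (p + 1 - m) - m = p + 1 - m from by omega]]
      rw [pvRenderAppend acc (chars.take m) _
        (by intro q hq; rw [List.length_take]; have := hacc q hq; omega)]
      rw [pvSetAppendRight _ _ p
        (by rw [pvRenderLen, List.length_take]; omega) '*']
      rw [show (pvRender acc (chars.take m)).length = m from by
        rw [pvRenderLen, List.length_take]; omega]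
      congr 1
      rw [show p + 1 - m = (p - m) + 1 from by omega]
      exact pvSetTake (chars.drop m) (p - m) (by rw [List.length_drop]; omega) '*'
    rw [hprefix]
    simp only [List.append_assoc, List.singleton_append]

theorem pvIdxs_eq (c : String) (l : List Char) :
    pvIdxs c l = pvCpos c l 0 := by
  suffices h : ∀ (s : Nat),
      ((PySem.List.enumerate l (s : Int)).filter
          (fun p => decide (String.ofList [p.2] = c))).map (fun p => p.1.toNat)
        = pvCpos c l s by
    have h0 := h 0
    rw [show ((0 : Nat) : Int) = (0 : Int) from rfl] at h0
    exact h0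
  induction l with
  | nil =>
    intro s
    simp [PySem.List.enumerate_nil, pvCpos]
  | cons d t ih =>
    intro s
    rw [PySem.List.enumerate_cons, List.filter_cons]
    rw [show ((s : Int) + 1) = ((s + 1 : Nat) : Int) from by push_cast; ring]
    by_cases hg : String.ofList [d] = c
    · rw [if_pos (by simpa using hg), List.map_cons, ih (s + 1)]
      simp [pvCpos, hg]
    · rw [if_neg (by simpa using hg), ih (s + 1)]
      simp [pvCpos, hg]

-- ===== VERDICT (by name: the statement is the Claim_ definition above) =====
theorem generate_digit_permutations_spec : Claim_equal_generate_digit_permutations := by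
  unfold Claim_equal_generate_digit_permutations
  intro n c _
  unfold Spec_generate_digit_permutations
  unfold generate_digit_permutations generate_digit_permutations_alt
  congr 1
  rw [pvIdxs_eq]
  rw [pvMain c n.toList ((pvCpos c n.toList 0).length) 0 0 []
    (by omega)
    (by rw [List.drop_zero]
        apply List.filter_eq_self.mpr
        intro p _
        simp)
    (by omega)
    (by intro p hp; simp at hp)]
  simp [pvRender]
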